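-- pv_equiv track=rewrite | github.com/genki-kusano/point_cloud_data | pcd/lattice.py | make_lattice
-- ===== SOURCE A (Python) =====
-- def make_lattice(num_side, dim_pcd):
--     list_lat = []
--     if dim_pcd == 3:
--         for i in range(num_side):
--             for j in range(num_side):
--                 for k in range(num_side):
--                     list_lat.append([i, j, k])
--     else:  # dim_pcd = 2
--         for i in range(num_side):
--             for j in range(num_side):
--                 list_lat.append([i, j])
--     return list_lat
-- ===== SOURCE B (Python) =====
-- def make_lattice(num_side, dim_pcd):
--     # single flat loop with mixed-radix decode instead of nested loops
--     dim = 3 if dim_pcd == 3 else 2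
--     side = max(num_side, 0)
--     list_lat = []
--     for n in range(side ** dim):
--         digits = []
--         q = n
--         for _ in range(dim):
--             q, r = divmod(q, side)
--             digits.append(r)
--         digits.reverse()
--         list_lat.append(digits)
--     return list_lat
-- ===== Notes on version B (the rewrite author's own statement) =====
-- stated objective: alternative
-- what changed: Replaced the dim-specific nested for-loops (2 or 3 levels) by a single flat loop over num_side**dim that decodes each flat index into grid coordinates with repeated divmod (mixed-radix decode), so one uniform loop body handles both dimensions.
import Mathlib
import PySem

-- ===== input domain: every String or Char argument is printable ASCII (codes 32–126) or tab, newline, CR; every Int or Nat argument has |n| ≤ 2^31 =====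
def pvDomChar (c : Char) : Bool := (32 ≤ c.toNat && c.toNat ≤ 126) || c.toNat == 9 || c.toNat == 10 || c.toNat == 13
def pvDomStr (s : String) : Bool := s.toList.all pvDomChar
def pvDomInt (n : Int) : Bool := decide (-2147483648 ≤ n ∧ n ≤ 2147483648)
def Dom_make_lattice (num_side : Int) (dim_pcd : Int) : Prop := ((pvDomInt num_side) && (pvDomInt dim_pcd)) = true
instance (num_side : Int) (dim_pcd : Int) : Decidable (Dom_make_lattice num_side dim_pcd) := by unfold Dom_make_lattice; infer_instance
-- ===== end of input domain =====

-- B replaces A's nested per-dimension loops by one flat loop over num_side**dim with a mixed-radix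
-- divmod decode of the flat index (objective: alternative decomposition, same cost).


-- ===== PORT A =====
def make_lattice (num_side : Int) (dim_pcd : Int) : List (List Int) :=
  if dim_pcd == 3 then
    (PySem.List.pyRange 0 num_side 1).foldl (fun acc i =>
      (PySem.List.pyRange 0 num_side 1).foldl (fun acc2 j =>
        (PySem.List.pyRange 0 num_side 1).foldl (fun acc3 k => acc3 ++ [[i, j, k]]) acc2) acc) []
  else
    (PySem.List.pyRange 0 num_side 1).foldl (fun acc i =>
      (PySem.List.pyRange 0 num_side 1).foldl (fun acc2 j => acc2 ++ [[i, j]]) acc) []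

-- ===== PORT B =====
def make_lattice_alt (num_side : Int) (dim_pcd : Int) : List (List Int) :=
  let dim : Int := if dim_pcd == 3 then 3 else 2
  let side : Int := max num_side 0
  (PySem.List.pyRange 0 (side ^ dim.toNat) 1).foldl (fun list_lat n =>
    let st := (PySem.List.pyRange 0 dim 1).foldl
      (fun (st : Int × List Int) _ =>
        (PySem.Int.floordiv st.1 side, st.2 ++ [PySem.Int.mod st.1 side]))
      (n, [])
    list_lat ++ [st.2.reverse]) []

-- ===== PRECONDITION & SPEC =====
def Spec_make_lattice (num_side : Int) (dim_pcd : Int) (out : List (List Int)) : Prop := out = make_lattice_alt num_side dim_pcd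
instance (num_side : Int) (dim_pcd : Int) (out : List (List Int)) : Decidable (Spec_make_lattice num_side dim_pcd out) := by unfold Spec_make_lattice; infer_instance

-- ===== CLAIM (what is proved, stated in full; the proofs are below) =====
def Claim_equal_make_lattice : Prop := ∀ (num_side : Int) (dim_pcd : Int), Dom_make_lattice num_side dim_pcd → Spec_make_lattice num_side dim_pcd (make_lattice num_side dim_pcd)

-- ===== LEMMAS AND PROOFS =====

-- pyRange 0 a 1 is the cast of List.range a.toNat (empty when a ≤ 0)
theorem pyRange_zero_one_toNat (a : Int) :
    PySem.List.pyRange 0 a 1 = (List.range a.toNat).map (fun k : Nat => (k : Int)) := by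
  by_cases h : 0 ≤ a
  · rw [← PySem.List.pyRange_zero_natCast a.toNat, Int.toNat_of_nonneg h]
  · have h0 : a.toNat = 0 := Int.toNat_of_nonpos (by omega)
    rw [h0]
    refine List.eq_nil_iff_forall_not_mem.mpr (fun x hx => ?_)
    have := PySem.List.mem_pyRange_one.mp hx
    omega

-- decoding a flat index n < a*s into (n / s, n % s) enumerates the grid lexicographically
theorem flatMap_range_mul {α : Type} (s a : Nat) (G : Nat → Nat → List α) :
    (List.range (a * s)).flatMap (fun n => G (n / s) (n % s)) =
      (List.range a).flatMap (fun q => (List.range s).flatMap (fun r => G q r)) := by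
  induction a with
  | zero => simp
  | succ a ih =>
    have hmul : (a + 1) * s = a * s + s := by ring
    rw [hmul, List.range_add, List.flatMap_append, ih, List.range_succ, List.flatMap_append,
      List.flatMap_map]
    congr 1
    simp only [List.flatMap_cons, List.flatMap_nil, List.append_nil]
    refine List.flatMap_congr (fun x hx => ?_)
    have hxs : x < s := List.mem_range.mp hx
    have hs : 0 < s := by omega
    have hd : (a * s + x) / s = a := by
      rw [Nat.add_comm, Nat.add_mul_div_right _ _ hs, Nat.div_eq_of_lt hxs, Nat.zero_add]
    have hm : (a * s + x) % s = x := by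
      rw [Nat.add_comm, Nat.add_mul_mod_self_right, Nat.mod_eq_of_lt hxs]
    simp [hd, hm]

theorem map_range_mul {α : Type} (s a : Nat) (g : Nat → Nat → α) :
    (List.range (a * s)).map (fun n => g (n / s) (n % s)) =
      (List.range a).flatMap (fun q => (List.range s).map (fun r => g q r)) := by
  rw [List.map_eq_flatMap, flatMap_range_mul s a (fun q r => [g q r])]
  refine List.flatMap_congr (fun q _ => ?_)
  rw [List.map_eq_flatMap]

-- 2D decode: flat index n < s*s decodes to (n/s, n%s), enumerating the square lexicographically
theorem dec2 (s : Nat) :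
    (List.range (s * s)).map (fun n => ([((n / s % s : Nat) : Int), ((n % s : Nat) : Int)] : List Int)) =
      (List.range s).flatMap (fun i =>
        (List.range s).map (fun j => ([((i : Nat) : Int), ((j : Nat) : Int)] : List Int))) := by
  refine (map_range_mul s s (fun q r => ([((q % s : Nat) : Int), ((r : Nat) : Int)] : List Int))).trans ?_
  refine List.flatMap_congr (fun q hq => ?_)
  rw [Nat.mod_eq_of_lt (List.mem_range.mp hq)]

-- 3D decode: flat index n < s*s*s decodes to (n/s/s, n/s%s, n%s)
theorem dec3 (s : Nat) :
    (List.range (s * s * s)).map (fun n =>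
        ([((n / s / s % s : Nat) : Int), ((n / s % s : Nat) : Int), ((n % s : Nat) : Int)] : List Int)) =
      (List.range s).flatMap (fun i => (List.range s).flatMap (fun j =>
        (List.range s).map (fun k =>
          ([((i : Nat) : Int), ((j : Nat) : Int), ((k : Nat) : Int)] : List Int)))) := by
  have hm : s * s * s = (s * s) * s := by ring
  rw [hm]
  refine (map_range_mul s (s * s) (fun q r =>
    ([((q / s % s : Nat) : Int), ((q % s : Nat) : Int), ((r : Nat) : Int)] : List Int))).trans ?_
  refine (flatMap_range_mul s s (fun i j => (List.range s).map (fun r =>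
    ([((i % s : Nat) : Int), ((j : Nat) : Int), ((r : Nat) : Int)] : List Int)))).trans ?_
  refine List.flatMap_congr (fun i hi => ?_)
  rw [Nat.mod_eq_of_lt (List.mem_range.mp hi)]

theorem make_lattice_spec_aux (num_side dim_pcd : Int) :
    make_lattice num_side dim_pcd = make_lattice_alt num_side dim_pcd := by
  have hside : max num_side 0 = ((num_side.toNat : Nat) : Int) := (Int.toNat_eq_max num_side).symm
  set s : Nat := num_side.toNat with hs
  by_cases h3 : dim_pcd = 3
  · have hr3 : PySem.List.pyRange 0 (3 : Int) 1 = [0, 1, 2] := by decide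
    have hpow : (((s : Int)) ^ (3 : Int).toNat).toNat = s * s * s := by
      rw [show ((3 : Int)).toNat = 3 from rfl,
        show ((s : Int)) ^ 3 = ((s * s * s : Nat) : Int) by push_cast; ring, Int.toNat_natCast]
    simp only [make_lattice, make_lattice_alt, h3, beq_self_eq_true, if_true, hside, hr3,
      pyRange_zero_one_toNat, hpow, List.foldl_cons, List.foldl_nil, List.reverse_cons,
      List.reverse_nil, List.cons_append, List.nil_append,
      PySem.List.foldl_append_singleton_eq_map, PySem.List.foldl_append_eq_flatMap,
      List.flatMap_map, List.map_map, Function.comp_def,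
      PySem.Int.floordiv_natCast, PySem.Int.mod_natCast]
    exact (dec3 s).symm
  · have hne : (dim_pcd == 3) = false := by simp [h3]
    have hr2 : PySem.List.pyRange 0 (2 : Int) 1 = [0, 1] := by decide
    have hpow : (((s : Int)) ^ (2 : Int).toNat).toNat = s * s := by
      rw [show ((2 : Int)).toNat = 2 from rfl,
        show ((s : Int)) ^ 2 = ((s * s : Nat) : Int) by push_cast; ring, Int.toNat_natCast]
    simp only [make_lattice, make_lattice_alt, hne, if_false, Bool.false_eq_true, hside, hr2,
      pyRange_zero_one_toNat, hpow, List.foldl_cons, List.foldl_nil, List.reverse_cons,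
      List.reverse_nil, List.cons_append, List.nil_append,
      PySem.List.foldl_append_singleton_eq_map, PySem.List.foldl_append_eq_flatMap,
      List.flatMap_map, List.map_map, Function.comp_def,
      PySem.Int.floordiv_natCast, PySem.Int.mod_natCast]
    exact (dec2 s).symm

-- ===== VERDICT (by name: the statement is the Claim_ definition above) =====
theorem make_lattice_spec : Claim_equal_make_lattice := by
  intro num_side dim_pcd _
  unfold Spec_make_lattice
  exact make_lattice_spec_aux num_side dim_pcd
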